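-- pv_equiv track=rewrite | github.com/harpercyy/scheduling_agents_ver2tenants_bORTOOL | scripts/auditor_tools.py | group_by_employee
-- ===== SOURCE A (Python) =====
-- from collections import defaultdict
--
-- def group_by_employee(entries: list) -> dict:
--     """Group schedule entries by employee_id, sorted by date."""
--     grouped = defaultdict(list)
--     for e in entries:
--         eid = e.get("employee_id", "unknown")
--         grouped[eid].append(e)
--     for eid in grouped:
--         grouped[eid].sort(key=lambda x: x.get("date", ""))
--     return grouped
-- ===== SOURCE B (Python) =====
-- from collections import defaultdict
--
-- def group_by_employee(entries: list) -> dict: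
--     """Group schedule entries by employee_id, sorted by date."""
--     order = list(dict.fromkeys(e.get("employee_id", "unknown") for e in entries))
--     return defaultdict(list, {
--         eid: sorted([e for e in entries if e.get("employee_id", "unknown") == eid],
--                     key=lambda x: x.get("date", ""))
--         for eid in order
--     })
-- ===== Notes on version B (the rewrite author's own statement) =====
-- stated objective: alternative
-- what changed: B never accumulates groups incrementally: it computes the first-occurrence-ordered key list once, then builds the result as a dict comprehension that filters and sorts the entries of each key directly, replacing A's append-into-defaultdict pass plus per-group in-place sort.
import Mathlib
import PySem

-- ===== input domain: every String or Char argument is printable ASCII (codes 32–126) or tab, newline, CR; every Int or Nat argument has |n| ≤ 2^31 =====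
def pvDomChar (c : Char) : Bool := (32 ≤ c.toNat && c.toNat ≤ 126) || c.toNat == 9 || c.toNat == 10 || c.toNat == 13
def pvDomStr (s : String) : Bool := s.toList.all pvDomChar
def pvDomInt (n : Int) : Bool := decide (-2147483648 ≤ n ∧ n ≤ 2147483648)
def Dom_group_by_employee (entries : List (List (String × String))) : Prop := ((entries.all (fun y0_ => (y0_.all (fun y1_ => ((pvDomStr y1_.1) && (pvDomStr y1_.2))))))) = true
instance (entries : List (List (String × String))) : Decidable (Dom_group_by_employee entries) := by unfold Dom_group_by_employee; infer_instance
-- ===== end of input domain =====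

-- B drops A's incremental grouping dict and per-group sort loop: it lists the distinct
-- employee ids in first-occurrence order once, then builds each group directly by filtering
-- and sorting the entries for that id (objective: alternative decomposition, not faster).

-- e.get(k, dflt) on a dict e (association list, first match)
def pvGet (e : List (String × String)) (k dflt : String) : String :=
  PySem.Dict.getD ⟨e⟩ k dflt

def pvEid (e : List (String × String)) : String := pvGet e "employee_id" "unknown"
def pvDate (e : List (String × String)) : String := pvGet e "date" ""

-- ===== PORT A =====
def group_by_employee (entries : List (List (String × String))) : List (String × List (List (String × String))) :=
  let grouped := entries.foldl
    (fun d e => d.modify (pvEid e) [] (fun g => g ++ [e]))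
    PySem.Dict.empty
  let grouped2 := grouped.keys.foldl
    (fun d k => d.modify k [] (fun g => PySem.List.sorted g pvDate))
    grouped
  grouped2.items

-- ===== PORT B =====
def group_by_employee_alt (entries : List (List (String × String))) : List (String × List (List (String × String))) :=
  let order := PySem.List.dedup (entries.map pvEid)
  order.map (fun eid =>
    (eid, PySem.List.sorted (entries.filter (fun e => pvEid e == eid)) pvDate))

-- ===== PRECONDITION & SPEC =====
def Spec_group_by_employee (entries : List (List (String × String))) (out : List (String × List (List (String × String)))) : Prop := out = group_by_employee_alt entries
instance (entries : List (List (String × String))) (out : List (String × List (List (String × String)))) : Decidable (Spec_group_by_employee entries out) := by unfold Spec_group_by_employee; infer_instance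

-- ===== CLAIM (what is proved, stated in full; the proofs are below) =====
def Claim_equal_group_by_employee : Prop := ∀ (entries : List (List (String × String))), Dom_group_by_employee entries → Spec_group_by_employee entries (group_by_employee entries)

-- ===== LEMMAS AND PROOFS =====

-- the getD at c of a "modify (key e)" grouping loop is the fold of the step over the entries whose key is c
lemma getD_foldl_modify_key_step (l : List (List (String × String)))
    (key : List (String × String) → String)
    (f : List (List (String × String)) → List (String × String) → List (List (String × String)))
    (d : PySem.Dict String (List (List (String × String)))) (c : String) :
    (l.foldl (fun d e => d.modify (key e) [] (fun g => f g e)) d).getD c []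
      = (l.filter (fun e => key e == c)).foldl f (d.getD c []) := by
  induction l generalizing d with
  | nil => rfl
  | cons e t ih =>
    simp only [List.foldl_cons, List.filter_cons, ih]
    by_cases h : key e = c
    · simp [h]
    · simp [h, PySem.Dict.getD_modify, Ne.symm h]

-- a modify loop over a nodup key list not containing c leaves getD at c unchanged
lemma getD_foldl_modify_not_mem (ks : List String)
    (f : List (List (String × String)) → List (List (String × String)))
    (d : PySem.Dict String (List (List (String × String)))) (c : String)
    (hc : c ∉ ks) :
    (ks.foldl (fun d k => d.modify k [] f) d).getD c [] = d.getD c [] := by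
  induction ks generalizing d with
  | nil => rfl
  | cons k t ih =>
    simp only [List.mem_cons, not_or] at hc
    simp only [List.foldl_cons, ih _ hc.2, PySem.Dict.getD_modify, if_neg hc.1]

-- a modify loop over a nodup key list containing c applies f exactly once at c
lemma getD_foldl_modify_mem (ks : List String)
    (f : List (List (String × String)) → List (List (String × String)))
    (d : PySem.Dict String (List (List (String × String)))) (c : String)
    (hnd : ks.Nodup) (hc : c ∈ ks) :
    (ks.foldl (fun d k => d.modify k [] f) d).getD c [] = f (d.getD c []) := by
  induction ks generalizing d with
  | nil => cases hc
  | cons k t ih =>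
    rcases List.nodup_cons.mp hnd with ⟨hk, hnd'⟩
    rcases List.mem_cons.mp hc with h | h
    · subst h
      rw [List.foldl_cons, getD_foldl_modify_not_mem t f _ c hk,
        PySem.Dict.getD_modify, if_pos rfl]
    · have hck : c ≠ k := fun hh => hk (hh ▸ h)
      rw [List.foldl_cons, ih _ hnd' h, PySem.Dict.getD_modify, if_neg hck]

lemma set_update_self (s : PySem.Set String) (l : List String)
    (h : ∀ x ∈ l, x ∈ s) : PySem.Set.update s l = s := by
  induction l generalizing s with
  | nil => rfl
  | cons x t ih =>
    have hx : PySem.Set.add s x = s := by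
      simp [PySem.Set.add, PySem.Set.contains, h x (List.mem_cons_self)]
    simp only [PySem.Set.update, List.foldl_cons] at *
    rw [hx, ih s (fun y hy => h y (List.mem_cons_of_mem _ hy))]

theorem group_by_employee_eq_alt (entries : List (List (String × String))) :
    group_by_employee entries = group_by_employee_alt entries := by
  unfold group_by_employee group_by_employee_alt
  set dA := entries.foldl (fun d e => d.modify (pvEid e) [] (fun g => g ++ [e])) PySem.Dict.empty with hdA
  have hKA : dA.keys = PySem.Set.ofList (entries.map pvEid) := by
    rw [hdA, PySem.Dict.keys_foldl_modify_key entries pvEid []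
      (fun _ e => fun g => g ++ [e])]
    simp [PySem.Set.ofList_eq_foldl, PySem.Set.update, PySem.Dict.keys]
    rfl
  have hndA : dA.keys.Nodup := by
    rw [hdA]
    exact PySem.Dict.nodup_keys_foldl_modify_key entries pvEid [] _ _ PySem.Dict.nodup_keys_empty
  have hgA : ∀ c, dA.getD c [] = entries.filter (fun e => pvEid e == c) := by
    intro c
    rw [hdA, getD_foldl_modify_key_step entries pvEid (fun g e => g ++ [e]),
      PySem.Dict.getD_empty, PySem.List.foldl_append_singleton_eq_self, List.nil_append]
  -- the second loop of A
  set dA2 := dA.keys.foldl (fun d k => d.modify k [] (fun g => PySem.List.sorted g pvDate)) dA with hdA2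
  have hK2 : dA2.keys = dA.keys := by
    rw [hdA2, PySem.Dict.keys_foldl_modify dA.keys []
      (fun _ _ => fun g => PySem.List.sorted g pvDate)]
    exact set_update_self dA.keys dA.keys (fun x hx => hx)
  have hnd2 : dA2.keys.Nodup := hK2 ▸ hndA
  rw [PySem.Dict.items_eq_map_keys dA2 hnd2 [], hK2, hKA,
    PySem.List.dedup_eq_ofList]
  apply List.map_congr_left
  intro c hc
  have hcA : c ∈ dA.keys := by rw [hKA]; exact hc
  rw [hdA2, getD_foldl_modify_mem dA.keys _ dA c hndA hcA, hgA c]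

-- ===== VERDICT (by name: the statement is the Claim_ definition above) =====
theorem group_by_employee_spec : Claim_equal_group_by_employee := by
  intro entries _
  exact group_by_employee_eq_alt entries
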